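-- pv_equiv track=rewrite | github.com/VanesaTaipe/Ac_12 | Al.py | marzullo
-- ===== SOURCE A (Python) =====
-- def marzullo(times):
--     events = []
--     for t, error in times:
--         events.append((t - error, 1))
--         events.append((t + error, -1))
--     events.sort()
--
--     count = 0
--     max_count = 0
--     best_time = None
--     for time, change in events:
--         count += change
--         if count > max_count:
--             max_count = count
--             best_time = time
--     return best_time
-- ===== SOURCE B (Python) =====
-- def marzullo(times):
--     starts = sorted(t - e for t, e in times)
--     ends = sorted(t + e for t, e in times)
--     n = len(starts)
--     count = 0
--     max_count = 0
--     best_time = None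
--     i = j = 0
--     while i < n:
--         if j < n and ends[j] <= starts[i]:
--             count -= 1
--             j += 1
--         else:
--             count += 1
--             i += 1
--             if count > max_count:
--                 max_count = count
--                 best_time = starts[i - 1]
--     return best_time
-- ===== Notes on version B (the rewrite author's own statement) =====
-- stated objective: alternative
-- what changed: Instead of building and lexicographically sorting one combined list of tagged (time, +/-1) events, B sorts interval starts and ends into two separate plain-int lists and runs a two-pointer merge sweep (ends processed first on ties) that maintains the count and best time inline, stopping once all starts are consumed.
import Mathlib
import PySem

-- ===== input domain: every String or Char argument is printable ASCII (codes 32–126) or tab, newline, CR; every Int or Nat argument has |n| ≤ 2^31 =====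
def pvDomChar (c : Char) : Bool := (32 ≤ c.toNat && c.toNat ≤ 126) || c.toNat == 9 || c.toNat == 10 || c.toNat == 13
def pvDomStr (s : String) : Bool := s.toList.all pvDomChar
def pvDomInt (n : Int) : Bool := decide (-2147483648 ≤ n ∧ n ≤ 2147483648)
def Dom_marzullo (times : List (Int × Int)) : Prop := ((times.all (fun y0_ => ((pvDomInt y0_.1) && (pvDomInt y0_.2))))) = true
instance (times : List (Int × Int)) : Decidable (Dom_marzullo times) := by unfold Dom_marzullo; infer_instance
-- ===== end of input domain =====

-- B replaces the single lexicographically sorted list of tagged (time, ±1) events by two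
-- separately sorted plain-int lists (interval starts and ends) swept with a two-pointer
-- merge that counts overlaps inline (alternative decomposition; same asymptotic cost).

-- ===== PORT A =====
-- the events-building loop of A ('events.append(...)' twice per pair)
def marzEvents (times : List (Int × Int)) : List (Int × Int) :=
  times.foldl (fun acc te => (acc ++ [(te.1 - te.2, (1 : Int))]) ++ [(te.1 + te.2, (-1 : Int))]) []

-- one iteration of A's counting loop over (count, max_count, best_time)
def marzStep (s : Int × Int × Option Int) (e : Int × Int) : Int × Int × Option Int :=
  let count := s.1 + e.2
  if count > s.2.1 then (count, count, some e.1) else (count, s.2.1, s.2.2)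

def marzullo (times : List (Int × Int)) : Option Int :=
  let events := PySem.List.sorted2 (marzEvents times) (fun p => p.1) (fun p => p.2)
  (events.foldl marzStep (0, 0, none)).2.2

-- ===== PORT B =====
-- B's while-loop: two-pointer sweep over the sorted starts and ends (ends first on ties)
def marzGo : List Int → List Int → Int → Int → Option Int → Option Int
  | [], _, _, _, best => best
  | s :: ss, e :: es, count, maxc, best =>
    if e ≤ s then marzGo (s :: ss) es (count - 1) maxc best
    else if count + 1 > maxc then marzGo ss (e :: es) (count + 1) (count + 1) (some s)
    else marzGo ss (e :: es) (count + 1) maxc best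
  | s :: ss, [], count, maxc, best =>
    if count + 1 > maxc then marzGo ss [] (count + 1) (count + 1) (some s)
    else marzGo ss [] (count + 1) maxc best
  termination_by ss es => ss.length + es.length

def marzStarts (times : List (Int × Int)) : List Int :=
  PySem.List.sorted (times.map (fun p => p.1 - p.2)) (fun x => x) false

def marzEnds (times : List (Int × Int)) : List Int :=
  PySem.List.sorted (times.map (fun p => p.1 + p.2)) (fun x => x) false

def marzullo_alt (times : List (Int × Int)) : Option Int :=
  marzGo (marzStarts times) (marzEnds times) 0 0 none

-- ===== PRECONDITION & SPEC =====
def Spec_marzullo (times : List (Int × Int)) (out : Option Int) : Prop := out = marzullo_alt times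
instance (times : List (Int × Int)) (out : Option Int) : Decidable (Spec_marzullo times out) := by unfold Spec_marzullo; infer_instance

-- ===== CLAIM (what is proved, stated in full; the proofs are below) =====
def Claim_equal_marzullo : Prop := ∀ (times : List (Int × Int)), Dom_marzullo times → Spec_marzullo times (marzullo times)

-- ===== LEMMAS AND PROOFS =====

-- Python's lexicographic ≤ on the (time, change) event tuples
def lexLe (a b : Int × Int) : Prop := a.1 < b.1 ∨ (a.1 = b.1 ∧ a.2 ≤ b.2)

-- the comparison sorted2 uses on the events (strict lexicographic <)
def evBefore (a b : Int × Int) : Bool :=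
  decide (a.1 < b.1) || (!decide (b.1 < a.1) && decide (a.2 < b.2))

theorem insertBy_pairwise_lexLe (x : Int × Int) (l : List (Int × Int))
    (h : l.Pairwise lexLe) : (PySem.List.insertBy evBefore x l).Pairwise lexLe := by
  induction l with
  | nil => simp [PySem.List.insertBy, lexLe]
  | cons y ys ih =>
    rw [List.pairwise_cons] at h
    simp only [PySem.List.insertBy]
    by_cases hb : evBefore x y = true
    · simp only [hb, if_true]
      have hxy : lexLe x y := by
        simp [evBefore, lexLe] at hb ⊢; omega
      refine List.Pairwise.cons ?_ (List.Pairwise.cons h.1 h.2)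
      intro z hz
      rcases List.mem_cons.1 hz with rfl | hz
      · exact hxy
      · have := h.1 z hz
        simp [lexLe] at hxy this ⊢; omega
    · simp only [hb]
      have hyx : lexLe y x := by
        simp [evBefore, lexLe] at hb ⊢; omega
      refine List.Pairwise.cons ?_ (ih h.2)
      intro z hz
      rcases (PySem.List.mem_insertBy _ _ _ _).1 hz with rfl | hz
      · exact hyx
      · exact h.1 z hz

theorem sorted2_pairwise_lexLe (xs : List (Int × Int)) :
    (PySem.List.sorted2 xs (fun p => p.1) (fun p => p.2)).Pairwise lexLe := by
  show (xs.foldl (fun acc x => PySem.List.insertBy evBefore x acc) []).Pairwise lexLe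
  have aux : ∀ (l : List (Int × Int)) (acc : List (Int × Int)), acc.Pairwise lexLe →
      (l.foldl (fun acc x => PySem.List.insertBy evBefore x acc) acc).Pairwise lexLe := by
    intro l
    induction l with
    | nil => intro acc h; simpa using h
    | cons x xs ih => intro acc h; exact ih _ (insertBy_pairwise_lexLe x acc h)
  exact aux xs [] (by simp)

-- the two sorted lists merged the way B sweeps them: ends (tagged -1) first on ties
def evMerge : List Int → List Int → List (Int × Int)
  | ss, [] => ss.map (fun s => (s, (1 : Int)))
  | [], es => es.map (fun e => (e, (-1 : Int)))
  | s :: ss, e :: es =>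
    if e ≤ s then (e, -1) :: evMerge (s :: ss) es else (s, 1) :: evMerge ss (e :: es)
  termination_by ss es => ss.length + es.length

theorem mem_evMerge {z : Int × Int} {ss es : List Int} (h : z ∈ evMerge ss es) :
    (z.2 = 1 ∧ z.1 ∈ ss) ∨ (z.2 = -1 ∧ z.1 ∈ es) := by
  fun_induction evMerge ss es with
  | case1 ss => simp at h; rcases h with ⟨a, ha, rfl⟩; simp [ha]
  | case2 es h' =>
    simp at h; rcases h with ⟨a, ha, rfl⟩; simp [ha]
  | case3 s ss e es hle ih =>
    rcases List.mem_cons.1 h with rfl | h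
    · simp
    · rcases ih h with h2 | h2
      · exact Or.inl h2
      · exact Or.inr ⟨h2.1, List.mem_cons_of_mem _ h2.2⟩
  | case4 s ss e es hle ih =>
    rcases List.mem_cons.1 h with rfl | h
    · simp
    · rcases ih h with h2 | h2
      · exact Or.inl ⟨h2.1, List.mem_cons_of_mem _ h2.2⟩
      · exact Or.inr h2

theorem evMerge_perm (ss es : List Int) :
    (evMerge ss es).Perm (ss.map (fun s => (s, (1 : Int))) ++ es.map (fun e => (e, (-1 : Int)))) := by
  fun_induction evMerge ss es with
  | case1 ss => simp
  | case2 es h' => simp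
  | case3 s ss e es hle ih =>
    refine ((ih).cons _).trans ?_
    exact (List.perm_middle).symm
  | case4 s ss e es hle ih =>
    exact (ih).cons _

theorem evMerge_pairwise {ss es : List Int}
    (hs : ss.Pairwise (· ≤ ·)) (he : es.Pairwise (· ≤ ·)) :
    (evMerge ss es).Pairwise lexLe := by
  fun_induction evMerge ss es with
  | case1 ss =>
    refine List.Pairwise.map _ ?_ hs
    intro a b hab; simp [lexLe]; omega
  | case2 es h' =>
    refine List.Pairwise.map _ ?_ he
    intro a b hab; simp [lexLe]; omega
  | case3 s ss e es hle ih =>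
    rw [List.pairwise_cons] at he
    refine List.Pairwise.cons ?_ (ih hs he.2)
    intro z hz
    rcases mem_evMerge hz with ⟨h1, h2⟩ | ⟨h1, h2⟩
    · have hsz : s ≤ z.1 := by
        rcases List.mem_cons.1 h2 with hh | hh
        · exact le_of_eq hh.symm
        · exact (List.rel_of_pairwise_cons hs) hh
      simp [lexLe]; omega
    · have := he.1 z.1 h2
      simp [lexLe]; omega
  | case4 s ss e es hle ih =>
    rw [List.pairwise_cons] at hs
    refine List.Pairwise.cons ?_ (ih hs.2 he)
    intro z hz
    rcases mem_evMerge hz with ⟨h1, h2⟩ | ⟨h1, h2⟩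
    · have := hs.1 z.1 h2
      simp [lexLe]; omega
    · have hez : e ≤ z.1 := by
        rcases List.mem_cons.1 h2 with hh | hh
        · exact le_of_eq hh.symm
        · exact (List.rel_of_pairwise_cons he) hh
      simp [lexLe]; omega

theorem marzEvents_eq (times : List (Int × Int)) :
    marzEvents times = times.flatMap (fun te => [(te.1 - te.2, (1 : Int)), (te.1 + te.2, (-1 : Int))]) := by
  have aux : ∀ (l : List (Int × Int)) (acc : List (Int × Int)),
      l.foldl (fun acc te => (acc ++ [(te.1 - te.2, (1 : Int))]) ++ [(te.1 + te.2, (-1 : Int))]) acc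
        = acc ++ l.flatMap (fun te => [(te.1 - te.2, (1 : Int)), (te.1 + te.2, (-1 : Int))]) := by
    intro l
    induction l with
    | nil => simp
    | cons x xs ih => intro acc; simp [List.flatMap_def]
  exact aux times []

theorem events_perm (times : List (Int × Int)) :
    (marzEvents times).Perm
      ((marzStarts times).map (fun s => (s, (1 : Int))) ++ (marzEnds times).map (fun e => (e, (-1 : Int)))) := by
  have h1 : (marzStarts times).Perm (times.map (fun p => p.1 - p.2)) :=
    PySem.List.sorted_perm _ _ _
  have h2 : (marzEnds times).Perm (times.map (fun p => p.1 + p.2)) :=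
    PySem.List.sorted_perm _ _ _
  refine List.Perm.trans ?_ (((h1.map _).append (h2.map _)).symm)
  rw [marzEvents_eq]
  have aux : ∀ (l : List (Int × Int)),
      (l.flatMap (fun te => [(te.1 - te.2, (1 : Int)), (te.1 + te.2, (-1 : Int))])).Perm
        ((l.map (fun p => p.1 - p.2)).map (fun s => (s, (1 : Int)))
          ++ (l.map (fun p => p.1 + p.2)).map (fun e => (e, (-1 : Int)))) := by
    intro l
    induction l with
    | nil => simp
    | cons x xs ih =>
      simp only [List.flatMap_cons, List.map_cons, List.cons_append]
      refine List.Perm.trans (List.Perm.cons _ (List.Perm.cons _ ih)) ?_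
      exact List.Perm.cons _ (List.perm_middle).symm
  exact aux times

theorem sorted2_events_eq_merge (times : List (Int × Int)) :
    PySem.List.sorted2 (marzEvents times) (fun p => p.1) (fun p => p.2)
      = evMerge (marzStarts times) (marzEnds times) := by
  apply List.Perm.eq_of_pairwise (le := lexLe)
  · intro a b _ _ hab hba
    rcases a with ⟨a1, a2⟩; rcases b with ⟨b1, b2⟩
    simp [lexLe] at hab hba
    have : a1 = b1 ∧ a2 = b2 := by omega
    simp [this.1, this.2]
  · exact sorted2_pairwise_lexLe _
  · exact evMerge_pairwise (PySem.List.sorted_pairwise _ _) (PySem.List.sorted_pairwise _ _)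
  · exact (PySem.List.sorted2_perm _ _ _ _).trans
      ((events_perm times).trans (evMerge_perm _ _).symm)

theorem endFold (es : List Int) (c m : Int) (b : Option Int) (h : c ≤ m) :
    (((es.map (fun e => (e, (-1 : Int)))).foldl marzStep (c, m, b)).2.2) = b := by
  induction es generalizing c with
  | nil => simp
  | cons e es ih =>
    simp only [List.map_cons, List.foldl_cons, marzStep]
    rw [if_neg (by omega)]
    exact ih (c + -1) (by omega)

theorem marzGo_eq_fold (ss es : List Int) (c m : Int) (b : Option Int) (h : c ≤ m) :
    marzGo ss es c m b = ((evMerge ss es).foldl marzStep (c, m, b)).2.2 := by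
  fun_induction marzGo ss es c m b with
  | case1 es c m b =>
    show b = ((evMerge [] es).foldl marzStep (c, m, b)).2.2
    cases es with
    | nil => simp [evMerge]
    | cons e es => rw [show evMerge [] (e :: es) = (e :: es).map (fun e => (e, (-1 : Int))) from by rw [evMerge]; simp, endFold _ c m b h]
  | case2 s ss e es c m b hle ih =>
    rw [show evMerge (s :: ss) (e :: es)
        = (e, -1) :: evMerge (s :: ss) es from by rw [evMerge, if_pos hle]]
    simp only [List.foldl_cons, marzStep]
    rw [if_neg (by omega)]
    exact ih (by omega)
  | case3 s ss e es c m b hle hgt ih =>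
    rw [show evMerge (s :: ss) (e :: es)
        = (s, 1) :: evMerge ss (e :: es) from by rw [evMerge, if_neg hle]]
    simp only [List.foldl_cons, marzStep]
    rw [if_pos (by omega)]
    exact ih (le_refl _)
  | case4 s ss e es c m b hle hgt ih =>
    rw [show evMerge (s :: ss) (e :: es)
        = (s, 1) :: evMerge ss (e :: es) from by rw [evMerge, if_neg hle]]
    simp only [List.foldl_cons, marzStep]
    rw [if_neg (by omega)]
    exact ih (by omega)
  | case5 s ss c m b hgt ih =>
    rw [show evMerge (s :: ss) [] = (s, 1) :: evMerge ss [] from by rw [evMerge, evMerge]; rfl]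
    simp only [List.foldl_cons, marzStep]
    rw [if_pos (by omega)]
    exact ih (le_refl _)
  | case6 s ss c m b hgt ih =>
    rw [show evMerge (s :: ss) [] = (s, 1) :: evMerge ss [] from by rw [evMerge, evMerge]; rfl]
    simp only [List.foldl_cons, marzStep]
    rw [if_neg (by omega)]
    exact ih (by omega)

-- ===== VERDICT (by name: the statement is the Claim_ definition above) =====
theorem marzullo_spec : Claim_equal_marzullo := by
  intro times _
  show marzullo times = marzullo_alt times
  rw [marzullo, marzullo_alt, sorted2_events_eq_merge,
    marzGo_eq_fold _ _ 0 0 none (le_refl _)]
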